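-- pv_equiv track=rewrite | github.com/Aman-Kumar342/placementprepration | placementprepration/equilibsum.py | max_equilibrium_sum
-- ===== SOURCE A (Python) =====
-- def max_equilibrium_sum(arr):
--     total = sum(arr)
--     left = 0
--     best = None
--     for value in arr:
--         total -= value
--         if left == total:
--             best = left if best is None else max(best, left)
--         left += value
--     return best
-- ===== SOURCE B (Python) =====
-- def max_equilibrium_sum(arr):
--     best = None
--     for i in range(len(arr)):
--         prefix = sum(arr[:i])
--         suffix = sum(arr[i + 1:])
--         if prefix == suffix:
--             best = prefix if best is None else max(best, prefix)
--     return best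
-- ===== Notes on version B (the rewrite author's own statement) =====
-- stated objective: alternative
-- what changed: Replaces A's single sweep with running total/left accumulators by an index loop that recomputes the prefix sum arr[:i] and suffix sum arr[i+1:] from fresh slices at every position.
import Mathlib
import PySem

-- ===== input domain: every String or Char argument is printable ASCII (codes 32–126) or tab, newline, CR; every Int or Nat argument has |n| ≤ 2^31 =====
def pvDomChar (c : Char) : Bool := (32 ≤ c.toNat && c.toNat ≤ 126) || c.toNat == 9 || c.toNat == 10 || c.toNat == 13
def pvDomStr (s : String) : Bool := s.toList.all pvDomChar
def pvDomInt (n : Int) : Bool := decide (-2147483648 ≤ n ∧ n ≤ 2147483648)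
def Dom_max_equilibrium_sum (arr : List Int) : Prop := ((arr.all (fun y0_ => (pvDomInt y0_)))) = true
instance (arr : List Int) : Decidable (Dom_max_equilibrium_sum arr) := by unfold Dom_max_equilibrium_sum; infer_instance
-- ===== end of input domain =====

-- B recomputes prefix/suffix sums from fresh slices at each index (a nested scan) instead of A's
-- single running-accumulator sweep; same return value, stated as an alternative decomposition.

-- ===== PORT A =====
def pvStepA (s : Int × Int × Option Int) (value : Int) : Int × Int × Option Int :=
  let total := s.1 - value
  let left := s.2.1
  let best := if left == total then
      some (match s.2.2 with | none => left | some b => max b left)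
    else s.2.2
  (total, left + value, best)

def max_equilibrium_sum (arr : List Int) : Option Int :=
  (arr.foldl pvStepA (arr.sum, 0, none)).2.2

-- ===== PORT B =====
def max_equilibrium_sum_alt (arr : List Int) : Option Int :=
  (PySem.List.pyRange 0 (arr.length : Int) 1).foldl (fun best i =>
      let pref := (PySem.List.slice arr none (some i)).sum
      let suf := (PySem.List.slice arr (some (i + 1)) none).sum
      if pref == suf then
        some (match best with | none => pref | some b => max b pref)
      else best) none

-- ===== PRECONDITION & SPEC =====
def Spec_max_equilibrium_sum (arr : List Int) (out : Option Int) : Prop := out = max_equilibrium_sum_alt arr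
instance (arr : List Int) (out : Option Int) : Decidable (Spec_max_equilibrium_sum arr out) := by unfold Spec_max_equilibrium_sum; infer_instance

-- ===== CLAIM (what is proved, stated in full; the proofs are below) =====
def Claim_equal_max_equilibrium_sum : Prop := ∀ (arr : List Int), Dom_max_equilibrium_sum arr → Spec_max_equilibrium_sum arr (max_equilibrium_sum arr)

-- ===== LEMMAS AND PROOFS =====

-- common reference: walk the remaining list `rest` with the prefix sum `l` accumulated so far
def pvGo : List Int → Int → Option Int → Option Int
  | [], _, b => b
  | v :: r, l, b =>
      pvGo r (l + v)
        (if l = r.sum then some (match b with | none => l | some x => max x l) else b)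

theorem portA_eq_pvGo (rest : List Int) : ∀ (l : Int) (b : Option Int),
    (rest.foldl pvStepA (rest.sum, l, b)).2.2 = pvGo rest l b := by
  induction rest with
  | nil => intro l b; rfl
  | cons v r ih =>
      intro l b
      have hsum : (v :: r).sum - v = r.sum := by simp [List.sum_cons]
      have hstep : pvStepA ((v :: r).sum, l, b) v =
          (r.sum, l + v,
            if l = r.sum then some (match b with | none => l | some x => max x l) else b) := by
        simp only [pvStepA, beq_iff_eq]
        rw [hsum]
      rw [List.foldl_cons, hstep]
      simp only [pvGo]
      exact ih (l + v) _

theorem portB_eq_pvGo (arr : List Int) : ∀ (m k : Nat) (b : Option Int), arr.length - k = m →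
    (PySem.List.pyRange (k : Int) (arr.length : Int) 1).foldl (fun best i =>
      let pref := (PySem.List.slice arr none (some i)).sum
      let suf := (PySem.List.slice arr (some (i + 1)) none).sum
      if pref == suf then
        some (match best with | none => pref | some b => max b pref)
      else best) b = pvGo (arr.drop k) ((arr.take k).sum) b := by
  intro m
  induction m with
  | zero =>
      intro k b hm
      have hk : arr.length ≤ k := by omega
      rw [PySem.List.pyRange_one_eq_nil (by exact_mod_cast hk)]
      simp [List.drop_eq_nil_of_le hk, pvGo]
  | succ m ih =>
      intro k b hm
      have hk : k < arr.length := by omega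
      rw [PySem.List.pyRange_one_cons (by exact_mod_cast hk)]
      simp only [List.foldl_cons]
      have hdrop : arr.drop k = arr[k] :: arr.drop (k + 1) :=
        List.drop_eq_getElem_cons hk
      have hslice1 : PySem.List.slice arr none (some (k : Int)) = arr.take k :=
        PySem.List.slice_to_natCast arr k
      have hslice2 : PySem.List.slice arr (some ((k : Int) + 1)) none = arr.drop (k + 1) := by
        rw [show ((k : Int) + 1) = ((k + 1 : Nat) : Int) by push_cast; ring]
        exact PySem.List.slice_from_natCast arr (k + 1)
      have htake : (arr.take (k + 1)).sum = (arr.take k).sum + arr[k] :=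
        List.sum_take_succ arr k hk
      have hcast : ((k + 1 : Nat) : Int) = (k : Int) + 1 := by push_cast; ring
      have hrec := ih (k + 1) (if (arr.take k).sum = (arr.drop (k + 1)).sum then
          some (match b with | none => (arr.take k).sum | some x => max x (arr.take k).sum)
        else b) (by omega)
      rw [htake, hcast] at hrec
      simp only [beq_iff_eq] at hrec
      rw [hslice1, hslice2, hdrop]
      simp only [pvGo, beq_iff_eq]
      exact hrec

-- ===== VERDICT (by name: the statement is the Claim_ definition above) =====
theorem max_equilibrium_sum_spec : Claim_equal_max_equilibrium_sum := by
  intro arr _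
  unfold Spec_max_equilibrium_sum max_equilibrium_sum max_equilibrium_sum_alt
  rw [portA_eq_pvGo arr 0 none]
  have := portB_eq_pvGo arr (arr.length - 0) 0 none rfl
  simpa using this.symm
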